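-- pv_equiv track=rewrite | github.com/kwchcr-ux/metacognition | ziwei_chart.py | place_main_stars
-- ===== SOURCE A (Python) =====
-- def place_main_stars(ziwei_branch):
--     """紫微 위치로부터 14개 주성 배치 (branch_idx → star_name list)"""
--     stars = {}  # branch_idx → [star_name, ...]
--
--     # 紫微 계열: 紫微(0), 天機(-1), [空](-2), 太陽(-3), 武曲(-4), 天同(-5),
--     #            [空](-6), [空](-7), 廉貞(-8)
--     ziwei_offsets = {
--         "紫微": 0, "天機": -1, "太陽": -3, "武曲": -4, "天同": -5, "廉貞": -8,
--     }
--     for name, offset in ziwei_offsets.items():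
--         br = (ziwei_branch + offset) % 12
--         stars.setdefault(br, []).append(name)
--
--     # 天府 위치: 紫微와 寅-申 축 대칭 → (4 - 紫微) mod 12
--     tianfu_branch = (4 - ziwei_branch) % 12
--
--     # 天府 계열: 天府(0), 太陰(+1), 貪狼(+2), 巨門(+3), 天相(+4),
--     #            天梁(+5), 七殺(+6), [空](+7,+8,+9), 破軍(+10)
--     tianfu_offsets = {
--         "天府": 0, "太陰": 1, "貪狼": 2, "巨門": 3, "天相": 4,
--         "天梁": 5, "七殺": 6, "破軍": 10,
--     }
--     for name, offset in tianfu_offsets.items():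
--         br = (tianfu_branch + offset) % 12
--         stars.setdefault(br, []).append(name)
--
--     return stars
-- ===== SOURCE B (Python) =====
-- # Branch-driven grouping over a precomputed 12-entry table (input only matters mod 12).
-- _ZIWEI = [("紫微", 0), ("天機", -1), ("太陽", -3), ("武曲", -4), ("天同", -5), ("廉貞", -8)]
-- _TIANFU = [("天府", 0), ("太陰", 1), ("貪狼", 2), ("巨門", 3), ("天相", 4),
--            ("天梁", 5), ("七殺", 6), ("破軍", 10)]
--
--
-- def _chart(r):
--     placements = [(n, (r + o) % 12) for n, o in _ZIWEI] + \
--                  [(n, ((4 - r) % 12 + o) % 12) for n, o in _TIANFU]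
--     seen = []
--     for _, b in placements:
--         if b not in seen:
--             seen.append(b)
--     return {b: [n for n, bb in placements if bb == b] for b in seen}
--
--
-- _TABLE = [_chart(r) for r in range(12)]
--
--
-- def place_main_stars(ziwei_branch):
--     return {b: list(ns) for b, ns in _TABLE[ziwei_branch % 12].items()}
-- ===== Notes on version B (the rewrite author's own statement) =====
-- stated objective: alternative
-- what changed: B replaces A's star-driven dict-setdefault filling with branch-driven grouping: it computes the flat (name, branch) placement list, then builds each chart by selecting names per branch, precomputing all 12 charts once (the input only matters mod 12) and answering by table lookup.
import Mathlib
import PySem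

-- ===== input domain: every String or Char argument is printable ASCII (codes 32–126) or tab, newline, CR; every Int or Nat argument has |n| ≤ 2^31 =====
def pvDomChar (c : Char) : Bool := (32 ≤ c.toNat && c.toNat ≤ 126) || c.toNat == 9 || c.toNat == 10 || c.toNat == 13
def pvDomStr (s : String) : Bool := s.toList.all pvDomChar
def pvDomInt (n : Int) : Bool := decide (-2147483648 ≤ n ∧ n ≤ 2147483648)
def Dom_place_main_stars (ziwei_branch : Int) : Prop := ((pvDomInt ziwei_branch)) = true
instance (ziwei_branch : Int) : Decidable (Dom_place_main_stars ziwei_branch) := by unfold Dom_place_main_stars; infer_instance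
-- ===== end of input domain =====

-- B groups the flat placement list by branch via a precomputed 12-entry table instead of A's
-- star-driven setdefault filling; return values proved identical for every Int input.

-- ===== PORT A =====
def pvZiweiOffsets : List (String × Int) :=
  [("紫微", 0), ("天機", -1), ("太陽", -3), ("武曲", -4), ("天同", -5), ("廉貞", -8)]

def pvTianfuOffsets : List (String × Int) :=
  [("天府", 0), ("太陰", 1), ("貪狼", 2), ("巨門", 3), ("天相", 4),
   ("天梁", 5), ("七殺", 6), ("破軍", 10)]

-- stars.setdefault(br, []).append(name)  ≡  stars[br] = stars.get(br, []) + [name]  = Dict.modify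
def place_main_stars (ziwei_branch : Int) : List (Int × List String) :=
  let stars : PySem.Dict Int (List String) :=
    pvZiweiOffsets.foldl
      (fun d p => d.modify (PySem.Int.mod (ziwei_branch + p.2) 12) [] (· ++ [p.1]))
      PySem.Dict.empty
  let tianfu_branch := PySem.Int.mod (4 - ziwei_branch) 12
  let stars :=
    pvTianfuOffsets.foldl
      (fun d p => d.modify (PySem.Int.mod (tianfu_branch + p.2) 12) [] (· ++ [p.1]))
      stars
  stars.items

-- ===== PORT B =====
def pvChart (r : Int) : List (Int × List String) :=
  let placements : List (String × Int) :=
    pvZiweiOffsets.map (fun p => (p.1, PySem.Int.mod (r + p.2) 12)) ++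
    pvTianfuOffsets.map (fun p => (p.1, PySem.Int.mod (PySem.Int.mod (4 - r) 12 + p.2) 12))
  let seen : List Int :=
    placements.foldl (fun s p => if p.2 ∈ s then s else s ++ [p.2]) []
  seen.map (fun b => (b, (placements.filter (fun p => p.2 == b)).map (·.1)))

def pvTable : List (List (Int × List String)) :=
  (List.range 12).map (fun r => pvChart (r : Int))

def place_main_stars_alt (ziwei_branch : Int) : List (Int × List String) :=
  pvTable.getD (PySem.Int.mod ziwei_branch 12).toNat []

-- ===== PRECONDITION & SPEC =====
def Spec_place_main_stars (ziwei_branch : Int) (out : List (Int × List String)) : Prop := out = place_main_stars_alt ziwei_branch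
instance (ziwei_branch : Int) (out : List (Int × List String)) : Decidable (Spec_place_main_stars ziwei_branch out) := by unfold Spec_place_main_stars; infer_instance

-- ===== CLAIM (what is proved, stated in full; the proofs are below) =====
def Claim_equal_place_main_stars : Prop := ∀ (ziwei_branch : Int), Dom_place_main_stars ziwei_branch → Spec_place_main_stars ziwei_branch (place_main_stars ziwei_branch)

-- ===== LEMMAS AND PROOFS =====

-- A's result depends on ziwei_branch only through its residue mod 12.
theorem place_main_stars_period (z : Int) :
    place_main_stars z = place_main_stars (z % 12) := by
  have h1 : ∀ o : Int, PySem.Int.mod (z + o) 12 = PySem.Int.mod (z % 12 + o) 12 := by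
    intro o
    rw [PySem.Int.mod_eq_emod_of_pos (by norm_num),
        PySem.Int.mod_eq_emod_of_pos (by norm_num)]
    conv_lhs => rw [Int.add_emod]
    conv_rhs => rw [Int.add_emod]
    rw [Int.emod_emod_of_dvd _ dvd_rfl]
  have h2 : PySem.Int.mod (4 - z) 12 = PySem.Int.mod (4 - z % 12) 12 := by
    rw [PySem.Int.mod_eq_emod_of_pos (by norm_num),
        PySem.Int.mod_eq_emod_of_pos (by norm_num)]
    conv_lhs => rw [Int.sub_emod]
    conv_rhs => rw [Int.sub_emod]
    rw [Int.emod_emod_of_dvd _ dvd_rfl]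
  unfold place_main_stars
  simp only [pvZiweiOffsets, pvTianfuOffsets, List.foldl_cons, List.foldl_nil]
  rw [h1 0, h1 (-1), h1 (-3), h1 (-4), h1 (-5), h1 (-8), h2]

-- So does B's (the table is indexed by the residue).
theorem place_main_stars_alt_period (z : Int) :
    place_main_stars_alt z = place_main_stars_alt (z % 12) := by
  unfold place_main_stars_alt
  rw [PySem.Int.mod_eq_emod_of_pos (by norm_num),
      PySem.Int.mod_eq_emod_of_pos (by norm_num), Int.emod_emod_of_dvd _ dvd_rfl]

theorem place_main_stars_eq_alt (z : Int) :
    place_main_stars z = place_main_stars_alt z := by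
  rw [place_main_stars_period, place_main_stars_alt_period]
  have h0 : 0 ≤ z % 12 := Int.emod_nonneg z (by norm_num)
  have h12 : z % 12 < 12 := Int.emod_lt_of_pos z (by norm_num)
  set r := z % 12 with hr
  clear_value r
  interval_cases r <;> decide

-- ===== VERDICT (by name: the statement is the Claim_ definition above) =====
theorem place_main_stars_spec : Claim_equal_place_main_stars := by
  intro z _
  exact place_main_stars_eq_alt z
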